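-- pv_equiv track=rewrite | github.com/HerrjeAlf/TestBuilder | funktionen.py | ergebnisraum_zmZ
-- ===== SOURCE A (Python) =====
-- def ergebnisraum_zmZ(anzahl_ziehen, farbe1='weiß', farbe2='schwarz'):
--     erstes_tubel = [farbe1 for element in range(anzahl_ziehen)]
--     omega = [erstes_tubel]
--     for anzahl in omega:
--         i = 0
--         for stelle in anzahl:
--             tubel = anzahl.copy()
--             tubel[i] = farbe2
--             for element in omega:
--                 if tubel not in omega:
--                     omega.append(tubel)
--             i += 1
--     return omega
-- ===== SOURCE B (Python) =====
-- def ergebnisraum_zmZ(anzahl_ziehen, farbe1='weiß', farbe2='schwarz'):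
--     # Direct level-order enumeration: level k holds the tuples with k positions
--     # flipped to farbe2; a tuple's children flip only positions strictly after
--     # its last farbe2 entry, so every tuple is generated exactly once and no
--     # membership test over the result is ever needed.
--     n = max(anzahl_ziehen, 0)
--     level = [[farbe1] * n]
--     omega = []
--     for _ in range(n + 1):
--         omega += level
--         level = [t[:i] + [farbe2] + t[i + 1:]
--                  for t in level
--                  for i in range(len(t))
--                  if farbe2 not in t[i:]]
--     return omega
-- ===== Notes on version B (the rewrite author's own statement) =====
-- stated objective: faster
-- what changed: A grows omega by BFS with a quadratic 'tubel not in omega' rescan nested inside a scan of omega; B enumerates the same order directly level by level, flipping only positions after a tuple's last farbe2 entry so each tuple is produced exactly once and every membership test disappears.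
import Mathlib
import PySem

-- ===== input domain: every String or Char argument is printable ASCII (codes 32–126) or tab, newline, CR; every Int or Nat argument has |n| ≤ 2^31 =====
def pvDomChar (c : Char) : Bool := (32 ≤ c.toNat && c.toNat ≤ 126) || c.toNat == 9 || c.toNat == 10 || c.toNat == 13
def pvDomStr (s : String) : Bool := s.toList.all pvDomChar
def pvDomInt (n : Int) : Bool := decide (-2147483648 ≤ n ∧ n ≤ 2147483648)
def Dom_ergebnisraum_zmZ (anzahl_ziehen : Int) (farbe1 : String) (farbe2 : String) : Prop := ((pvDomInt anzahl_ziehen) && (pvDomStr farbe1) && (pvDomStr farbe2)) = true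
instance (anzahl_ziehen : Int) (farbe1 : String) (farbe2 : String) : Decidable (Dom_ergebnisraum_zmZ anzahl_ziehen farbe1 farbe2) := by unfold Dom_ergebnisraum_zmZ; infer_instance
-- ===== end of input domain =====

-- ===== PORT A =====
-- Python A: BFS over the growing list omega.  The inner 'for element in omega:
-- if tubel not in omega: omega.append(tubel)' appends tubel at most once —
-- exactly when omega is nonempty and tubel is absent (after the first append the
-- guard is False for the rest of that loop) — and is ported as that effect.
-- The outer 'for anzahl in omega' iterates by index over the growing list; it is
-- ported with fuel 2 ^ erstes.length + 1, which always suffices: omega only ever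
-- holds pairwise-distinct lists of length erstes.length over two colours, so it
-- never exceeds 2 ^ erstes.length elements (this is proved in the lemmas below).
def pvA_inner (farbe2 : String) (anzahl : List String) (omega : List (List String)) :
    List (List String) :=
  (List.range anzahl.length).foldl (fun om i =>
    let tubel := anzahl.set i farbe2
    if om ≠ [] ∧ tubel ∉ om then om ++ [tubel] else om) omega

def pvA_loop (farbe2 : String) : Nat → Nat → List (List String) → List (List String)
  | 0, _, omega => omega
  | fuel + 1, idx, omega =>
    if h : idx < omega.length then
      pvA_loop farbe2 fuel (idx + 1) (pvA_inner farbe2 omega[idx] omega)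
    else omega

def ergebnisraum_zmZ (anzahl_ziehen : Int) (farbe1 : String) (farbe2 : String) :
    List (List String) :=
  let erstes_tubel := (PySem.List.pyRange 0 anzahl_ziehen 1).map (fun _ => farbe1)
  pvA_loop farbe2 (2 ^ erstes_tubel.length + 1) 0 [erstes_tubel]

-- ===== PORT B =====
-- Python B: enumerate level by level; children flip only positions i with no
-- farbe2 at position ≥ i ('farbe2 not in t[i:]', ported via List.drop — exact for
-- 0 ≤ i; 't[:i] + [farbe2] + t[i+1:]' ported via take/drop, exact likewise).
-- '[farbe1] * n' is List.replicate, 'range(n)' over list positions is List.range.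
def pvB_children (farbe2 : String) (t : List String) : List (List String) :=
  ((List.range t.length).filter (fun i => farbe2 ∉ t.drop i)).map
    (fun i => t.take i ++ farbe2 :: t.drop (i + 1))

def ergebnisraum_zmZ_alt (anzahl_ziehen : Int) (farbe1 : String) (farbe2 : String) :
    List (List String) :=
  let n := (max anzahl_ziehen 0).toNat
  let st := (List.range (n + 1)).foldl
    (fun (st : List (List String) × List (List String)) _ =>
      (st.1 ++ st.2, st.2.flatMap (pvB_children farbe2)))
    ([], [List.replicate n farbe1])
  st.1

-- ===== PRECONDITION & SPEC =====
def Spec_ergebnisraum_zmZ (anzahl_ziehen : Int) (farbe1 : String) (farbe2 : String) (out : List (List String)) : Prop := out = ergebnisraum_zmZ_alt anzahl_ziehen farbe1 farbe2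
instance (anzahl_ziehen : Int) (farbe1 : String) (farbe2 : String) (out : List (List String)) : Decidable (Spec_ergebnisraum_zmZ anzahl_ziehen farbe1 farbe2 out) := by unfold Spec_ergebnisraum_zmZ; infer_instance

-- ===== CLAIM (what is proved, stated in full; the proofs are below) =====
def Claim_equal_ergebnisraum_zmZ : Prop := ∀ (anzahl_ziehen : Int) (farbe1 : String) (farbe2 : String), Dom_ergebnisraum_zmZ anzahl_ziehen farbe1 farbe2 → Spec_ergebnisraum_zmZ anzahl_ziehen farbe1 farbe2 (ergebnisraum_zmZ anzahl_ziehen farbe1 farbe2)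

-- ===== LEMMAS AND PROOFS =====
/-! Proof-only machinery.  Each produced tuple is coded by the sorted list of
positions holding `farbe2`; `pvLevel L k` lists the k-element position sets in
the exact order both programs emit them, and `pvSets L` concatenates the
levels.  The key facts: `pvSets L = [] :: (pvSets L).flatMap (pvBlock L)`
(the BFS queue equation) and completeness/ordering of the levels. -/

def pvMask (L : Nat) (c1 c2 : String) (S : List Nat) : List String :=
  (List.range L).map (fun i => if i ∈ S then c2 else c1)

def pvBlock (L : Nat) (S : List Nat) : List (List Nat) :=
  ((List.range L).filter (fun i => S.all (fun x => decide (x < i)))).map (fun i => S ++ [i])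

def pvLevel (L : Nat) : Nat → List (List Nat)
  | 0 => [[]]
  | k + 1 => (pvLevel L k).flatMap (pvBlock L)

def pvFL (L k : Nat) : List (List Nat) := (List.range k).flatMap (pvLevel L)

def pvSets (L : Nat) : List (List Nat) := pvFL L (L + 1)

def pvOrd (X Y : List Nat) : Prop := X.length < Y.length ∨ List.Lex (· < ·) X Y

lemma pvBlock_mem {L : Nat} {S T : List Nat} (h : T ∈ pvBlock L S) :
    ∃ i, i < L ∧ (∀ x ∈ S, x < i) ∧ T = S ++ [i] := by
  simp only [pvBlock, List.mem_map, List.mem_filter, List.mem_range, List.all_eq_true,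
    decide_eq_true_eq] at h
  obtain ⟨i, ⟨hi, hall⟩, rfl⟩ := h
  exact ⟨i, hi, hall, rfl⟩

lemma pvBlock_mem_of {L : Nat} {S : List Nat} {i : Nat} (hi : i < L) (hall : ∀ x ∈ S, x < i) :
    S ++ [i] ∈ pvBlock L S := by
  simp only [pvBlock, List.mem_map, List.mem_filter, List.mem_range, List.all_eq_true,
    decide_eq_true_eq]
  exact ⟨i, ⟨hi, hall⟩, rfl⟩

lemma pvLevel_mem {L k : Nat} {S : List Nat} (h : S ∈ pvLevel L k) :
    S.length = k ∧ S.Pairwise (· < ·) ∧ ∀ x ∈ S, x < L := by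
  induction k generalizing S with
  | zero =>
    simp only [pvLevel, List.mem_singleton] at h
    subst h; simp
  | succ k ih =>
    simp only [pvLevel, List.mem_flatMap] at h
    obtain ⟨P, hP, hT⟩ := h
    obtain ⟨len, pw, bd⟩ := ih hP
    obtain ⟨i, hi, hall, rfl⟩ := pvBlock_mem hT
    refine ⟨by simp [len], ?_, ?_⟩
    · rw [List.pairwise_append]
      exact ⟨pw, by simp, by simpa using hall⟩
    · intro x hx
      rcases List.mem_append.mp hx with h | h
      · exact bd x h
      · simp only [List.mem_singleton] at h; omega

lemma pv_sorted_sublist : ∀ (l S : List Nat), l.Pairwise (· < ·) → S.Pairwise (· < ·) →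
    (∀ x ∈ S, x ∈ l) → List.Sublist S l := by
  intro l
  induction l with
  | nil =>
    intro S _ _ hsub
    cases S with
    | nil => simp
    | cons x S' => exact absurd (hsub x (by simp)) (by simp)
  | cons y l' ih =>
    intro S hl hS hsub
    rcases List.pairwise_cons.mp hl with ⟨hy, hl'⟩
    cases S with
    | nil => simp
    | cons x S' =>
      rcases List.pairwise_cons.mp hS with ⟨hx, hS'⟩
      by_cases hxy : x = y
      · subst hxy
        refine List.Sublist.cons₂ x (ih S' hl' hS' ?_)
        intro z hz
        rcases List.mem_cons.mp (hsub z (List.mem_cons_of_mem _ hz)) with rfl | h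
        · exact absurd (hx z hz) (lt_irrefl z)
        · exact h
      · have hxl' : x ∈ l' := by
          rcases List.mem_cons.mp (hsub x (by simp)) with rfl | h
          · exact absurd rfl hxy
          · exact h
        refine List.Sublist.cons y (ih (x :: S') hl' hS ?_)
        intro z hz
        have hyx : y < x := hy x hxl'
        have hzx : x ≤ z := by
          rcases List.mem_cons.mp hz with rfl | h
          · exact le_refl _
          · exact le_of_lt (hx z h)
        rcases List.mem_cons.mp (hsub z hz) with rfl | h
        · exact absurd hyx (by omega)
        · exact h

lemma pvLevel_succ {L k : Nat} : (pvLevel L k).flatMap (pvBlock L) = pvLevel L (k + 1) := rfl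

lemma pvLevel_le {L k : Nat} {S : List Nat} (h : S ∈ pvLevel L k) : k ≤ L := by
  obtain ⟨len, pw, bd⟩ := pvLevel_mem h
  have hsub : List.Sublist S (List.range L) :=
    pv_sorted_sublist _ _ List.pairwise_lt_range pw (fun x hx => List.mem_range.mpr (bd x hx))
  have := hsub.length_le
  simp only [List.length_range] at this
  omega
lemma pvLevel_eq_nil {L k : Nat} (h : L < k) : pvLevel L k = [] := by
  refine List.eq_nil_iff_forall_not_mem.mpr (fun S hS => ?_)
  exact absurd (pvLevel_le hS) (by omega)

lemma pv_lex_middle : ∀ (u : List Nat) {a b : Nat} (w1 w2 : List Nat), a < b →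
    List.Lex (· < ·) (u ++ a :: w1) (u ++ b :: w2) := by
  intro u
  induction u with
  | nil => intro a b w1 w2 h; exact List.Lex.rel h
  | cons x u ih => intro a b w1 w2 h; exact List.Lex.cons (ih _ _ h)

lemma pv_lex_append : ∀ (u1 u2 w1 w2 : List Nat), u1.length = u2.length →
    List.Lex (· < ·) u1 u2 → List.Lex (· < ·) (u1 ++ w1) (u2 ++ w2) := by
  intro u1
  induction u1 with
  | nil =>
    intro u2 w1 w2 hlen hlex
    cases u2 with
    | nil => cases hlex
    | cons y u2 => simp at hlen
  | cons x u1 ih =>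
    intro u2 w1 w2 hlen hlex
    cases u2 with
    | nil => simp at hlen
    | cons y u2 =>
      cases hlex with
      | rel h => exact List.Lex.rel h
      | cons h => exact List.Lex.cons (ih _ _ _ (by simpa using hlen) h)

lemma pv_lex_irrefl : ∀ (X : List Nat), ¬ List.Lex (· < ·) X X := by
  intro X
  induction X with
  | nil => intro h; cases h
  | cons x X ih =>
    intro h
    cases h with
    | rel h => exact lt_irrefl _ h
    | cons h => exact ih h

lemma pv_lex_asymm : ∀ (X Y : List Nat), List.Lex (· < ·) X Y → List.Lex (· < ·) Y X → False := by
  intro X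
  induction X with
  | nil =>
    intro Y h1 h2
    cases h1 <;> cases h2
  | cons x X ih =>
    intro Y h1 h2
    cases Y with
    | nil => cases h1
    | cons y Y =>
      cases h1 with
      | rel h =>
        cases h2 with
        | rel h' => omega
        | cons h' => exact absurd h (by omega)
      | cons h =>
        cases h2 with
        | rel h' => exact absurd h' (by omega)
        | cons h' => exact ih Y h h'

lemma pvLevel_pairwise {L : Nat} : ∀ k, (pvLevel L k).Pairwise (List.Lex (· < ·)) := by
  intro k
  induction k with
  | zero => simp [pvLevel]
  | succ k ih =>
    show ((pvLevel L k).flatMap (pvBlock L)).Pairwise _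
    rw [List.flatMap_def]
    apply List.pairwise_flatten.mpr
    refine ⟨?_, ?_⟩
    · intro b hb
      obtain ⟨S, hS, rfl⟩ := List.mem_map.mp hb
      unfold pvBlock
      apply List.pairwise_map.mpr
      have hfil : (((List.range L).filter (fun i => S.all (fun x => decide (x < i))))).Pairwise (· < ·) :=
        List.pairwise_lt_range.filter _
      exact hfil.imp (fun {a b} h => pv_lex_middle S [] [] h)
    · apply List.pairwise_map.mpr
      refine ih.imp_of_mem ?_
      intro S1 S2 hS1 hS2 hlex T1 hT1 T2 hT2
      obtain ⟨i, _, _, rfl⟩ := pvBlock_mem hT1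
      obtain ⟨j, _, _, rfl⟩ := pvBlock_mem hT2
      exact pv_lex_append _ _ _ _ (by rw [(pvLevel_mem hS1).1, (pvLevel_mem hS2).1]) hlex

lemma pvSets_pairwise {L : Nat} : (pvSets L).Pairwise pvOrd := by
  unfold pvSets pvFL
  rw [List.flatMap_def]
  apply List.pairwise_flatten.mpr
  refine ⟨?_, ?_⟩
  · intro b hb
    obtain ⟨k, _, rfl⟩ := List.mem_map.mp hb
    exact (pvLevel_pairwise k).imp (fun {a b} h => Or.inr h)
  · apply List.pairwise_map.mpr
    refine List.pairwise_lt_range.imp_of_mem ?_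
    intro k1 k2 _ _ hk T1 hT1 T2 hT2
    exact Or.inl (by rw [(pvLevel_mem hT1).1, (pvLevel_mem hT2).1]; exact hk)

lemma pvSets_nodup {L : Nat} : (pvSets L).Nodup := by
  refine pvSets_pairwise.imp ?_
  rintro a b h rfl
  rcases h with h | h
  · exact lt_irrefl _ h
  · exact pv_lex_irrefl _ h

lemma pvSets_mem {L : Nat} {S : List Nat} (h : S ∈ pvSets L) :
    S.Pairwise (· < ·) ∧ (∀ x ∈ S, x < L) ∧ S ∈ pvLevel L S.length ∧ S.length ≤ L := by
  unfold pvSets pvFL at h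
  obtain ⟨k, hk, hS⟩ := List.mem_flatMap.mp h
  obtain ⟨len, pw, bd⟩ := pvLevel_mem hS
  subst len
  exact ⟨pw, bd, hS, pvLevel_le hS⟩

lemma pvLevel_complete {L : Nat} : ∀ (P : List Nat), P.Pairwise (· < ·) →
    (∀ x ∈ P, x < L) → P ∈ pvLevel L P.length := by
  intro P
  induction P using List.reverseRecOn with
  | nil => intro _ _; simp [pvLevel]
  | append_singleton P a ih =>
    intro hpw hbd
    rw [List.pairwise_append] at hpw
    obtain ⟨hP, -, hlt⟩ := hpw
    have hmem : P ∈ pvLevel L P.length :=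
      ih hP (fun x hx => hbd x (List.mem_append_left _ hx))
    have hlen : (P ++ [a]).length = P.length + 1 := by simp
    rw [hlen]
    show P ++ [a] ∈ (pvLevel L P.length).flatMap (pvBlock L)
    refine List.mem_flatMap.mpr ⟨P, hmem, ?_⟩
    exact pvBlock_mem_of (hbd a (by simp)) (fun x hx => hlt x hx a (by simp))

lemma pvSets_eq {L : Nat} : pvSets L = [] :: (pvSets L).flatMap (pvBlock L) := by
  have hA : (List.range (L + 2)).flatMap (pvLevel L)
      = (List.range (L + 1)).flatMap (pvLevel L) := by
    rw [List.range_succ, List.flatMap_append]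
    simp [pvLevel_eq_nil (show L < L + 1 by omega)]
  have hB : (List.range (L + 2)).flatMap (pvLevel L)
      = pvLevel L 0 ++ (List.range (L + 1)).flatMap (fun k => pvLevel L (k + 1)) := by
    rw [List.range_succ_eq_map, List.flatMap_cons, List.flatMap_map]
  have hmain : (List.range (L + 1)).flatMap (pvLevel L)
      = [] :: (List.range (L + 1)).flatMap (fun k => pvLevel L (k + 1)) := by
    rw [← hA, hB]
    rfl
  show (List.range (L + 1)).flatMap (pvLevel L)
      = [] :: ((List.range (L + 1)).flatMap (pvLevel L)).flatMap (pvBlock L)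
  rw [List.flatMap_assoc]
  simp only [pvLevel_succ]
  exact hmain
lemma pv_flat_split {α : Type} : ∀ (Ls : List (List α)) (done rest : List α),
    Ls.flatten = done ++ rest → rest ≠ [] →
    ∃ k, ∃ (hk : k < Ls.length), ∃ d e,
      done = (Ls.take k).flatten ++ d ∧ Ls[k] = d ++ e ∧ e ≠ [] := by
  intro Ls
  induction Ls with
  | nil =>
    intro done rest h hne
    simp only [List.flatten_nil] at h
    exact absurd (List.append_eq_nil_iff.mp h.symm).2 hne
  | cons X Ls ih =>
    intro done rest h hne
    rw [List.flatten_cons] at h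
    rcases List.append_eq_append_iff.mp h with ⟨a', ha1, ha2⟩ | ⟨c', hc1, hc2⟩
    · -- done = X ++ a', Ls.flatten = a' ++ rest
      obtain ⟨k, hk, d, e, hd, he, hene⟩ := ih a' rest ha2 hne
      refine ⟨k + 1, by simpa using Nat.succ_lt_succ hk, d, e, ?_, by simpa using he, hene⟩
      simp only [List.take_succ_cons, List.flatten_cons, List.append_assoc]
      rw [ha1, hd]
    · -- X = done ++ c', rest = c' ++ Ls.flatten
      by_cases hc : c' = []
      · subst hc
        rw [List.append_nil] at hc1
        rw [List.nil_append] at hc2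
        obtain ⟨k, hk, d, e, hd, he, hene⟩ := ih [] rest hc2.symm hne
        obtain ⟨hflat, hdnil⟩ := List.append_eq_nil_iff.mp hd.symm
        refine ⟨k + 1, by simpa using Nat.succ_lt_succ hk, d, e, ?_, by simpa using he, hene⟩
        simp only [List.take_succ_cons, List.flatten_cons]
        rw [hflat, hdnil, hc1]
        simp
      · refine ⟨0, by simp, done, c', by simp, by simpa using hc1, hc⟩
lemma pv_level_sum {L : Nat} (k : Nat) :
    ((List.range k).map (fun j => (pvLevel L (j + 1)).length)).sum + 1
      = ((List.range k).map (fun j => (pvLevel L j).length)).sum + (pvLevel L k).length := by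
  have h1 : (List.range (k + 1)).map (fun j => (pvLevel L j).length)
      = 1 :: (List.range k).map (fun j => (pvLevel L (j + 1)).length) := by
    rw [List.range_succ_eq_map, List.map_cons, List.map_map]
    rfl
  have h2 : (List.range (k + 1)).map (fun j => (pvLevel L j).length)
      = (List.range k).map (fun j => (pvLevel L j).length) ++ [(pvLevel L k).length] := by
    rw [List.range_succ, List.map_append]
    rfl
  have := congrArg List.sum h1
  rw [h2] at this
  simp only [List.sum_cons, List.sum_append, List.sum_cons, List.sum_nil] at this
  omega

lemma pv_starve {L : Nat} (done rest : List (List Nat)) (S : List Nat)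
    (h : pvSets L = done ++ S :: rest) :
    done.length < 1 + (done.flatMap (pvBlock L)).length := by
  have hflat : ((List.range (L + 1)).map (pvLevel L)).flatten = done ++ S :: rest := by
    rw [← List.flatMap_def]
    exact h
  obtain ⟨k, hk, d, e, hdone, hlev, hene⟩ := pv_flat_split _ _ _ hflat (by simp)
  simp only [List.length_map, List.length_range] at hk
  have hlev' : pvLevel L k = d ++ e := by
    have h0 : ((List.range (L + 1)).map (pvLevel L))[k]'(by simpa using hk) = pvLevel L k := by
      simp
    rw [← h0]
    exact hlev
  have hdone' : done = (List.range k).flatMap (pvLevel L) ++ d := by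
    rw [hdone, ← List.map_take, List.take_range, show min k (L + 1) = k from by omega,
      ← List.flatMap_def]
  have hlen1 : done.length
      = ((List.range k).map (fun j => (pvLevel L j).length)).sum + d.length := by
    rw [hdone', List.length_append, List.length_flatMap]
  have hlen2 : (done.flatMap (pvBlock L)).length
      = ((List.range k).map (fun j => (pvLevel L (j + 1)).length)).sum
        + (d.flatMap (pvBlock L)).length := by
    rw [hdone', List.flatMap_append, List.length_append, List.flatMap_assoc]
    congr 2
    rw [List.length_flatMap]
    congr 1
  have hdp : d.length < (pvLevel L k).length := by
    rw [hlev', List.length_append]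
    have : 0 < e.length := List.length_pos_iff.mpr hene
    omega
  have htel := pv_level_sum (L := L) k
  omega
lemma pv_decomp {L : Nat} {done rest : List (List Nat)} {S : List Nat}
    (h : pvSets L = done ++ S :: rest) :
    pvSets L = ([] :: done.flatMap (pvBlock L))
      ++ (pvBlock L S ++ rest.flatMap (pvBlock L)) := by
  conv_lhs => rw [pvSets_eq]
  rw [h]
  simp [List.flatMap_append]

lemma pv_take_pre {L : Nat} {done rest : List (List Nat)} {S : List Nat}
    (h : pvSets L = done ++ S :: rest) :
    (pvSets L).take (1 + (done.flatMap (pvBlock L)).length)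
      = [] :: done.flatMap (pvBlock L) := by
  conv_lhs => rw [pv_decomp h]
  exact List.take_left' (by simp [Nat.add_comm])

lemma pv_take_pre_block {L : Nat} {done rest : List (List Nat)} {S : List Nat}
    (h : pvSets L = done ++ S :: rest) :
    (pvSets L).take (1 + (done.flatMap (pvBlock L)).length + (pvBlock L S).length)
      = ([] :: done.flatMap (pvBlock L)) ++ pvBlock L S := by
  conv_lhs => rw [pv_decomp h]
  rw [show 1 + (done.flatMap (pvBlock L)).length + (pvBlock L S).length
      = ([] :: done.flatMap (pvBlock L)).length + (pvBlock L S).length by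
    simp [Nat.add_comm]]
  rw [List.take_append]
  congr 1
  · exact List.take_of_length_le (by omega)
  · rw [Nat.add_sub_cancel_left]
    exact List.take_left' rfl
lemma pv_S_not_done {L : Nat} {done rest : List (List Nat)} {S : List Nat}
    (h : pvSets L = done ++ S :: rest) : S ∉ done := by
  have := pvSets_nodup (L := L)
  rw [h] at this
  have hdis := List.disjoint_of_nodup_append this
  intro hmem
  exact hdis hmem (List.mem_cons_self)

lemma pv_getElem_mid {L : Nat} {done rest : List (List Nat)} {S : List Nat}
    (h : pvSets L = done ++ S :: rest) :
    ∃ (hd : done.length < (pvSets L).length), (pvSets L)[done.length] = S := by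
  have hlen : done.length < (pvSets L).length := by
    rw [h, List.length_append]
    simp
  refine ⟨hlen, ?_⟩
  have : (pvSets L)[done.length]'hlen
      = (done ++ S :: rest)[done.length]'(by rw [← h]; exact hlen) := by
    congr 1
  rw [this, List.getElem_append_right (le_refl done.length)]
  simp

lemma pv_S_mem_pre {L : Nat} {done rest : List (List Nat)} {S : List Nat}
    (h : pvSets L = done ++ S :: rest) :
    S ∈ [] :: done.flatMap (pvBlock L) := by
  rw [← pv_take_pre h]
  obtain ⟨hd, hS⟩ := pv_getElem_mid h
  have hlt := pv_starve done rest S h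
  have hlen : done.length < ((pvSets L).take (1 + (done.flatMap (pvBlock L)).length)).length := by
    rw [pv_take_pre h]
    simpa [Nat.add_comm] using hlt
  have : ((pvSets L).take (1 + (done.flatMap (pvBlock L)).length))[done.length]'hlen = S := by
    rw [List.getElem_take]
    exact hS
  rw [← this]
  exact List.getElem_mem hlen

lemma pvMask_length {L : Nat} {c1 c2 : String} {S : List Nat} :
    (pvMask L c1 c2 S).length = L := by simp [pvMask]

lemma pvMask_ext {L : Nat} {c1 c2 : String} {S1 S2 : List Nat}
    (h : ∀ x, x ∈ S1 ↔ x ∈ S2) : pvMask L c1 c2 S1 = pvMask L c1 c2 S2 := by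
  unfold pvMask
  apply List.map_congr_left
  intro i _
  by_cases hi : i ∈ S1
  · rw [if_pos hi, if_pos ((h i).mp hi)]
  · rw [if_neg hi, if_neg (fun hh => hi ((h i).mpr hh))]

lemma pvMask_set {L : Nat} {c1 c2 : String} {S : List Nat} {i : Nat} (hi : i < L) :
    (pvMask L c1 c2 S).set i c2 = pvMask L c1 c2 (S ++ [i]) := by
  apply List.ext_getElem
  · simp [pvMask]
  · intro j h1 h2
    simp only [List.getElem_set, pvMask, List.getElem_map, List.getElem_range,
      List.mem_append, List.mem_singleton]
    by_cases hj : i = j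
    · subst hj
      simp
    · rw [if_neg hj]
      by_cases hjS : j ∈ S
      · simp [hjS]
      · have hor : ¬ (j ∈ S ∨ j = i) := by
          rintro (hh | hh)
          · exact hjS hh
          · exact hj hh.symm
        rw [if_neg hjS, if_neg hor]
lemma pvMask_mem_iff {L : Nat} {c1 c2 : String} {S1 S2 : List Nat} (hne : c1 ≠ c2)
    (h : pvMask L c1 c2 S1 = pvMask L c1 c2 S2) {j : Nat} (hj : j < L) :
    j ∈ S1 ↔ j ∈ S2 := by
  have hg : (if j ∈ S1 then c2 else c1) = (if j ∈ S2 then c2 else c1) := by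
    have h1 : (pvMask L c1 c2 S1)[j]'(by rw [pvMask_length]; exact hj)
        = (if j ∈ S1 then c2 else c1) := by
      simp [pvMask]
    have h2 : (pvMask L c1 c2 S2)[j]'(by rw [pvMask_length]; exact hj)
        = (if j ∈ S2 then c2 else c1) := by
      simp [pvMask]
    rw [← h1, ← h2]
    congr 1
  by_cases h1 : j ∈ S1 <;> by_cases h2 : j ∈ S2 <;>
    simp only [h1, h2, if_pos, if_neg, if_true, if_false] at hg ⊢ <;> tauto

lemma pv_sorted_eq : ∀ (S1 S2 : List Nat), S1.Pairwise (· < ·) → S2.Pairwise (· < ·) →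
    (∀ x, x ∈ S1 ↔ x ∈ S2) → S1 = S2 := by
  intro S1
  induction S1 with
  | nil =>
    intro S2 _ _ hm
    cases S2 with
    | nil => rfl
    | cons y S2' => exact absurd ((hm y).mpr (by simp)) (by simp)
  | cons x S1' ih =>
    intro S2 h1 h2 hm
    cases S2 with
    | nil => exact absurd ((hm x).mp (by simp)) (by simp)
    | cons y S2' =>
      rcases List.pairwise_cons.mp h1 with ⟨hx1, h1'⟩
      rcases List.pairwise_cons.mp h2 with ⟨hy2, h2'⟩
      have hxy : x = y := by
        rcases List.mem_cons.mp ((hm x).mp (by simp)) with h | h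
        · exact h
        · rcases List.mem_cons.mp ((hm y).mpr (by simp)) with h' | h'
          · exact h'.symm
          · have := hx1 y h'
            have := hy2 x h
            omega
      subst hxy
      have htails : ∀ z, z ∈ S1' ↔ z ∈ S2' := by
        intro z
        constructor
        · intro hz
          rcases List.mem_cons.mp ((hm z).mp (List.mem_cons_of_mem _ hz)) with h | h
          · exact absurd (hx1 z hz) (by omega)
          · exact h
        · intro hz
          rcases List.mem_cons.mp ((hm z).mpr (List.mem_cons_of_mem _ hz)) with h | h
          · exact absurd (hy2 z hz) (by omega)
          · exact h
      rw [ih S2' h1' h2' htails]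

lemma pvMask_canon {L : Nat} {c1 c2 : String} {S1 S2 : List Nat} (hne : c1 ≠ c2)
    (h1p : S1.Pairwise (· < ·)) (h1b : ∀ x ∈ S1, x < L)
    (h2p : S2.Pairwise (· < ·)) (h2b : ∀ x ∈ S2, x < L)
    (h : pvMask L c1 c2 S1 = pvMask L c1 c2 S2) : S1 = S2 := by
  have hm : ∀ x, x ∈ S1 ↔ x ∈ S2 := by
    intro x
    by_cases hx : x < L
    · exact pvMask_mem_iff hne h hx
    · constructor <;> intro hmem
      · exact absurd (h1b x hmem) hx
      · exact absurd (h2b x hmem) hx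
  exact pv_sorted_eq S1 S2 h1p h2p hm
lemma pv_mem_mask_drop {L : Nat} {c1 c2 : String} {S : List Nat} {i : Nat} (hne : c1 ≠ c2)
    (hbd : ∀ x ∈ S, x < L) :
    c2 ∈ (pvMask L c1 c2 S).drop i ↔ ∃ j ∈ S, i ≤ j := by
  rw [List.mem_iff_getElem]
  constructor
  · rintro ⟨k, hk, heq⟩
    rw [List.getElem_drop] at heq
    have hkL : i + k < L := by
      have := hk
      simp only [List.length_drop, pvMask_length] at this
      omega
    simp only [pvMask, List.getElem_map, List.getElem_range] at heq
    by_cases hjS : i + k ∈ S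
    · exact ⟨i + k, hjS, by omega⟩
    · rw [if_neg hjS] at heq
      exact absurd heq hne
  · rintro ⟨j, hjS, hij⟩
    have hjL : j < L := hbd j hjS
    refine ⟨j - i, by simp only [List.length_drop, pvMask_length]; omega, ?_⟩
    rw [List.getElem_drop]
    simp only [pvMask, List.getElem_map, List.getElem_range]
    rw [show i + (j - i) = j by omega, if_pos hjS]

lemma pv_dropWhile_head {p : Nat → Bool} : ∀ {l : List Nat} {x : Nat} {xs : List Nat},
    l.dropWhile p = x :: xs → p x = false := by
  intro l
  induction l with
  | nil => intro x xs h; simp [List.dropWhile] at h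
  | cons y l ih =>
    intro x xs h
    rw [List.dropWhile_cons] at h
    by_cases hp : p y
    · rw [if_pos hp] at h; exact ih h
    · rw [if_neg hp] at h
      cases h
      simpa using hp

lemma pv_foldl_const {α β : Type} (f : β → α → β) (b : β) :
    ∀ (l : List α), (∀ a ∈ l, f b a = b) → l.foldl f b = b := by
  intro l
  induction l with
  | nil => intro _; rfl
  | cons x l ih =>
    intro h
    rw [List.foldl_cons, h x (by simp)]
    exact ih (fun a ha => h a (by simp [ha]))

-- The inner two Python loops: processing `pvMask S` when omega is the prefix
-- `[] :: done.flatMap pvBlock` of pvSets appends exactly the block of S.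
lemma pvA_inner_run {L : Nat} {c1 c2 : String} (hne : c1 ≠ c2)
    (done rest : List (List Nat)) (S : List Nat)
    (hS : pvSets L = done ++ S :: rest) :
    pvA_inner c2 (pvMask L c1 c2 S)
        (((pvSets L).take (1 + (done.flatMap (pvBlock L)).length)).map (pvMask L c1 c2))
      = ((pvSets L).take (1 + (done.flatMap (pvBlock L)).length + (pvBlock L S).length)).map
          (pvMask L c1 c2) := by
  have hSmem : S ∈ pvSets L := by rw [hS]; simp
  obtain ⟨Spw, Sbd, hSlev, hSle⟩ := pvSets_mem hSmem
  rw [pv_take_pre hS, pv_take_pre_block hS, List.map_append]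
  unfold pvA_inner
  rw [pvMask_length]
  have key : ∀ i, i ≤ L →
      (List.range i).foldl
        (fun om i =>
          let tubel := (pvMask L c1 c2 S).set i c2
          if om ≠ [] ∧ tubel ∉ om then om ++ [tubel] else om)
        (([] :: done.flatMap (pvBlock L)).map (pvMask L c1 c2))
      = (([] :: done.flatMap (pvBlock L)).map (pvMask L c1 c2))
        ++ (((List.range i).filter (fun j => S.all (fun x => decide (x < j)))).map
             (fun j => pvMask L c1 c2 (S ++ [j]))) := by
    intro i
    induction i with
    | zero => intro _; simp
    | succ i ih =>
      intro hiL
      have hi : i < L := by omega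
      rw [List.range_succ, List.foldl_append, ih (by omega), List.foldl_cons, List.foldl_nil]
      simp only [pvMask_set hi]
      by_cases hq : S.all (fun x => decide (x < i)) = true
      · -- i is a fresh child position: it gets appended
        have hall : ∀ x ∈ S, x < i := by
          simpa only [List.all_eq_true, decide_eq_true_eq] using hq
        have hnotin : pvMask L c1 c2 (S ++ [i]) ∉
            (([] :: done.flatMap (pvBlock L)).map (pvMask L c1 c2))
            ++ (((List.range i).filter (fun j => S.all (fun x => decide (x < j)))).map
                 (fun j => pvMask L c1 c2 (S ++ [j]))) := by
          intro hmem
          have hSipw : (S ++ [i]).Pairwise (· < ·) := by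
            rw [List.pairwise_append]
            exact ⟨Spw, by simp, by simpa using hall⟩
          have hSibd : ∀ x ∈ S ++ [i], x < L := by
            intro x hx
            rcases List.mem_append.mp hx with h | h
            · exact Sbd x h
            · simp only [List.mem_singleton] at h; omega
          rcases List.mem_append.mp hmem with hmem | hmem
          · rcases List.mem_map.mp hmem with ⟨T, hT, hmask⟩
            rcases List.mem_cons.mp hT with rfl | hT
            · -- T = [] : sizes differ at position i
              have h0 : i ∈ ([] : List Nat) :=
                (pvMask_mem_iff hne hmask hi).mpr (by simp)
              simp at h0
            · obtain ⟨D, hD, hTD⟩ := List.mem_flatMap.mp hT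
              have hDmem : D ∈ pvSets L := by rw [hS]; simp [hD]
              obtain ⟨Dpw, Dbd, -, -⟩ := pvSets_mem hDmem
              obtain ⟨j, hjL, hjall, rfl⟩ := pvBlock_mem hTD
              have hTpw : (D ++ [j]).Pairwise (· < ·) := by
                rw [List.pairwise_append]
                exact ⟨Dpw, by simp, by simpa using hjall⟩
              have hTbd : ∀ x ∈ D ++ [j], x < L := by
                intro x hx
                rcases List.mem_append.mp hx with h | h
                · exact Dbd x h
                · simp only [List.mem_singleton] at h; omega
              have heq := pvMask_canon hne hSipw hSibd hTpw hTbd hmask.symm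
              have := List.append_inj' heq.symm rfl
              have hSD : S = D := this.1.symm
              exact pv_S_not_done hS (hSD ▸ hD)
          · rcases List.mem_map.mp hmem with ⟨j, hj, hmask⟩
            rcases List.mem_filter.mp hj with ⟨hjr, hjq⟩
            have hjlt : j < i := List.mem_range.mp hjr
            have hjall : ∀ x ∈ S, x < j := by
              simpa only [List.all_eq_true, decide_eq_true_eq] using hjq
            have hSjpw : (S ++ [j]).Pairwise (· < ·) := by
              rw [List.pairwise_append]
              exact ⟨Spw, by simp, by simpa using hjall⟩
            have hSjbd : ∀ x ∈ S ++ [j], x < L := by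
              intro x hx
              rcases List.mem_append.mp hx with h | h
              · exact Sbd x h
              · simp only [List.mem_singleton] at h; omega
            have heq := pvMask_canon hne hSjpw hSjbd hSipw hSibd hmask
            have := List.append_inj' heq rfl
            have : j = i := by
              have h2 := this.2
              simpa using h2
            omega
        rw [if_pos ⟨by simp, hnotin⟩]
        rw [List.filter_append, List.map_append]
        have hone : (List.filter (fun j => S.all (fun x => decide (x < j))) [i]) = [i] := by
          simp only [List.filter_cons, List.filter_nil]
          rw [if_pos hq]
        rw [hone]
        simp [List.append_assoc]
      · -- position i is not a fresh child: tubel is already present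
        have hin : pvMask L c1 c2 (S ++ [i]) ∈
            (([] :: done.flatMap (pvBlock L)).map (pvMask L c1 c2))
            ++ (((List.range i).filter (fun j => S.all (fun x => decide (x < j)))).map
                 (fun j => pvMask L c1 c2 (S ++ [j]))) := by
          apply List.mem_append_left
          by_cases hiS : i ∈ S
          · -- flipping an already-flipped position: tubel = mask S ∈ omega
            have hmeq : pvMask L c1 c2 (S ++ [i]) = pvMask L c1 c2 S := by
              apply pvMask_ext
              intro x
              simp only [List.mem_append, List.mem_singleton]
              constructor
              · rintro (h | rfl)
                · exact h
                · exact hiS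
              · intro h
                exact Or.inl h
            rw [hmeq]
            exact List.mem_map_of_mem (pv_S_mem_pre hS)
          · -- the tuple S ∪ {i} was appended earlier, from its lexicographically
            -- least parent P = (S ∪ {i}) minus its maximum, which precedes S
            have hex : ∃ s ∈ S, i < s := by
              simp only [List.all_eq_true, decide_eq_true_eq] at hq
              push_neg at hq
              obtain ⟨s, hs, hsge⟩ := hq
              refine ⟨s, hs, ?_⟩
              rcases Nat.lt_or_ge i s with h | h
              · exact h
              · have : s = i ∨ s < i := by omega
                rcases this with rfl | h2
                · exact absurd hs hiS
                · omega
            obtain ⟨v0, vt, hvs⟩ : ∃ v0 vt,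
                S.dropWhile (fun x => decide (x < i)) = v0 :: vt := by
              cases hvs : S.dropWhile (fun x => decide (x < i)) with
              | nil =>
                exfalso
                obtain ⟨s, hsS, hsi⟩ := hex
                have htw : S.takeWhile (fun x => decide (x < i)) = S := by
                  have hh := List.takeWhile_append_dropWhile
                    (p := fun x => decide (x < i)) (l := S)
                  rw [hvs, List.append_nil] at hh
                  exact hh
                have hsu : s ∈ S.takeWhile (fun x => decide (x < i)) := by
                  rw [htw]; exact hsS
                have := List.mem_takeWhile_imp hsu
                simp only [decide_eq_true_eq] at this
                omega
              | cons a b => exact ⟨a, b, rfl⟩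
            obtain ⟨u, hu⟩ : ∃ u, S.takeWhile (fun x => decide (x < i)) = u := ⟨_, rfl⟩
            have huv : S = u ++ v0 :: vt := by
              conv_lhs => rw [← List.takeWhile_append_dropWhile
                (p := fun x => decide (x < i)) (l := S)]
              rw [hvs, hu]
            have hv0 : ¬ (v0 < i) := by
              have := pv_dropWhile_head hvs
              simpa using this
            have hv0S : v0 ∈ S := by rw [huv]; simp
            have hv0i : i < v0 := by
              rcases Nat.lt_or_ge i v0 with h | h
              · exact h
              · have : v0 = i ∨ v0 < i := by omega
                rcases this with rfl | h2
                · exact absurd hv0S hiS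
                · omega
            have hupw : u.Pairwise (· < ·) := by
              rw [← hu]
              exact Spw.sublist (List.takeWhile_sublist _)
            have hvpw : (v0 :: vt).Pairwise (· < ·) := by
              rw [← hvs]
              exact Spw.sublist (List.dropWhile_sublist _)
            have hu_lt : ∀ a ∈ u, a < i := by
              intro a ha
              rw [← hu] at ha
              have := List.mem_takeWhile_imp ha
              simpa using this
            obtain ⟨T', hT'⟩ : ∃ T', u ++ i :: v0 :: vt = T' := ⟨_, rfl⟩
            have hT'mem : ∀ x, x ∈ T' ↔ x ∈ S ++ [i] := by
              intro x
              rw [← hT', huv]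
              simp only [List.mem_append, List.mem_cons, List.mem_singleton]
              tauto
            have hT'pw : T'.Pairwise (· < ·) := by
              rw [← hT', List.pairwise_append]
              refine ⟨hupw, ?_, ?_⟩
              · rw [List.pairwise_cons]
                refine ⟨?_, hvpw⟩
                intro x hx
                rcases List.mem_cons.mp hx with rfl | hx
                · exact hv0i
                · have := (List.pairwise_cons.mp hvpw).1 x hx
                  omega
              · intro a ha b hb
                have hai := hu_lt a ha
                rcases List.mem_cons.mp hb with rfl | hb
                · exact hai
                · rcases List.mem_cons.mp hb with rfl | hb
                  · omega
                  · have := (List.pairwise_cons.mp hvpw).1 b hb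
                    omega
            have hT'bd : ∀ x ∈ T', x < L := by
              intro x hx
              rcases List.mem_append.mp ((hT'mem x).mp hx) with h | h
              · exact Sbd x h
              · simp only [List.mem_singleton] at h; omega
            have hT'ne : T' ≠ [] := by rw [← hT']; simp
            have hPpw : T'.dropLast.Pairwise (· < ·) := hT'pw.sublist (List.dropLast_sublist _)
            have hPbd : ∀ x ∈ T'.dropLast, x < L := by
              intro x hx
              exact hT'bd x ((List.dropLast_sublist _).subset hx)
            have hPlast : T'.dropLast ++ [T'.getLast hT'ne] = T' :=
              List.dropLast_concat_getLast hT'ne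
            have hPlevel : T'.dropLast ∈ pvLevel L T'.dropLast.length :=
              pvLevel_complete T'.dropLast hPpw hPbd
            have hT'block : T' ∈ pvBlock L T'.dropLast := by
              have hlastmem : T'.getLast hT'ne ∈ T' := List.getLast_mem hT'ne
              have hlastL : T'.getLast hT'ne < L := hT'bd _ hlastmem
              have hallP : ∀ x ∈ T'.dropLast, x < T'.getLast hT'ne := by
                have hh := hT'pw
                rw [← hPlast, List.pairwise_append] at hh
                intro x hx
                exact hh.2.2 x hx _ (by simp)
              have := pvBlock_mem_of hlastL hallP
              rw [hPlast] at this
              exact this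
            have hT'len : T'.length = S.length + 1 := by
              rw [← hT', huv]
              simp only [List.length_append, List.length_cons]
              omega
            have hPlen : T'.dropLast.length = S.length := by
              rw [List.length_dropLast, hT'len]
              omega
            have hPmemSets : T'.dropLast ∈ pvSets L := by
              unfold pvSets pvFL
              refine List.mem_flatMap.mpr ⟨T'.dropLast.length, ?_, hPlevel⟩
              rw [List.mem_range]
              omega
            have hPv : T'.dropLast = u ++ i :: (v0 :: vt).dropLast := by
              rw [← hT', List.dropLast_append, if_neg (by simp)]
              rfl
            have hiP : i ∈ T'.dropLast := by rw [hPv]; simp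
            have hPneS : T'.dropLast ≠ S := fun h => hiS (h ▸ hiP)
            have hlexPS : List.Lex (· < ·) T'.dropLast S := by
              rw [hPv]
              conv_rhs => rw [huv]
              exact pv_lex_middle u _ _ hv0i
            have hPdone : T'.dropLast ∈ done := by
              have hmem3 : T'.dropLast ∈ done ++ S :: rest := by rw [← hS]; exact hPmemSets
              rcases List.mem_append.mp hmem3 with h | h
              · exact h
              · rcases List.mem_cons.mp h with h | h
                · exact absurd h hPneS
                · -- P after S in pvSets would force S <lex P, contradiction
                  exfalso
                  have hpw := pvSets_pairwise (L := L)
                  rw [hS] at hpw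
                  have hcross := (List.pairwise_append.mp hpw).2.1
                  have hordSP : pvOrd S T'.dropLast := (List.pairwise_cons.mp hcross).1 _ h
                  rcases hordSP with hlen | hlex
                  · omega
                  · exact pv_lex_asymm _ _ hlexPS hlex
            have hT'mem2 : T' ∈ done.flatMap (pvBlock L) :=
              List.mem_flatMap.mpr ⟨T'.dropLast, hPdone, hT'block⟩
            have hfinal : pvMask L c1 c2 (S ++ [i]) = pvMask L c1 c2 T' :=
              pvMask_ext (fun x => (hT'mem x).symm)
            rw [hfinal]
            exact List.mem_map_of_mem (by simp [hT'mem2])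
        rw [if_neg (by simp only [not_and, not_not]; intro _; exact hin)]
        rw [List.filter_append, List.map_append]
        have hzero : (List.filter (fun j => S.all (fun x => decide (x < j))) [i]) = [] := by
          simp only [List.filter_cons, List.filter_nil]
          rw [if_neg hq]
        rw [hzero]
        simp
  have h2 : (([] :: done.flatMap (pvBlock L)).map (pvMask L c1 c2))
        ++ (((List.range L).filter (fun j => S.all (fun x => decide (x < j)))).map
             (fun j => pvMask L c1 c2 (S ++ [j])))
      = (([] :: done.flatMap (pvBlock L)).map (pvMask L c1 c2))
        ++ (pvBlock L S).map (pvMask L c1 c2) := by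
    congr 1
    unfold pvBlock
    rw [List.map_map]
    rfl
  exact (key L (le_refl L)).trans h2

lemma pv_run {L : Nat} {c1 c2 : String} (hne : c1 ≠ c2) :
    ∀ (rest done : List (List Nat)) (fuel : Nat),
      pvSets L = done ++ rest → rest.length + 1 ≤ fuel →
      pvA_loop c2 fuel done.length
          (((pvSets L).take (1 + (done.flatMap (pvBlock L)).length)).map (pvMask L c1 c2))
        = (pvSets L).map (pvMask L c1 c2) := by
  intro rest
  induction rest with
  | nil =>
    intro done fuel hS hfuel
    obtain ⟨f, rfl⟩ : ∃ f, fuel = f + 1 := ⟨fuel - 1, by omega⟩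
    rw [List.append_nil] at hS
    subst hS
    have hm : 1 + ((pvSets L).flatMap (pvBlock L)).length = (pvSets L).length := by
      conv_rhs => rw [pvSets_eq]
      simp [Nat.add_comm]
    rw [hm, List.take_length, pvA_loop]
    rw [dif_neg (by simp)]
  | cons S rest ih =>
    intro done fuel hS hfuel
    obtain ⟨f, rfl⟩ : ∃ f, fuel = f + 1 := ⟨fuel - 1, by omega⟩
    have hlt := pv_starve done rest S hS
    have homega : ((pvSets L).take (1 + (done.flatMap (pvBlock L)).length)).length
        = 1 + (done.flatMap (pvBlock L)).length := by
      rw [pv_take_pre hS]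
      simp [Nat.add_comm]
    rw [pvA_loop]
    rw [dif_pos (by rw [List.length_map, homega]; exact hlt)]
    have hidx : ∀ (hh : done.length <
        (((pvSets L).take (1 + (done.flatMap (pvBlock L)).length)).map (pvMask L c1 c2)).length),
        (((pvSets L).take (1 + (done.flatMap (pvBlock L)).length)).map
          (pvMask L c1 c2))[done.length]'hh = pvMask L c1 c2 S := by
      intro hh
      rw [List.getElem_map, List.getElem_take]
      obtain ⟨hd, hge⟩ := pv_getElem_mid hS
      rw [hge]
    rw [hidx, pvA_inner_run hne done rest S hS]
    have harr : 1 + (done.flatMap (pvBlock L)).length + (pvBlock L S).length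
        = 1 + (((done ++ [S]).flatMap (pvBlock L))).length := by
      rw [List.flatMap_append, List.length_append]
      simp only [List.flatMap_cons, List.flatMap_nil, List.append_nil]
      omega
    rw [harr, show done.length + 1 = (done ++ [S]).length by simp]
    exact ih (done ++ [S]) f (by rw [hS]; simp)
      (by simp only [List.length_cons] at hfuel; omega)

lemma pv_card {L : Nat} : (pvSets L).length ≤ 2 ^ L := by
  have hsub : pvSets L ⊆ (List.range L).sublists := by
    intro S hS
    obtain ⟨pw, bd, -, -⟩ := pvSets_mem hS
    exact List.mem_sublists.mpr
      (pv_sorted_sublist _ _ List.pairwise_lt_range pw (fun x hx => List.mem_range.mpr (bd x hx)))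
  have := (pvSets_nodup.subperm hsub).length_le
  simpa [List.length_sublists] using this

lemma pv_mask_nil {L : Nat} {c1 c2 : String} : pvMask L c1 c2 [] = List.replicate L c1 := by
  unfold pvMask
  simp only [List.not_mem_nil, if_false]
  rw [List.map_const']
  simp

lemma pv_erstes (n : Int) (c1 : String) :
    (PySem.List.pyRange 0 n 1).map (fun _ => c1) = List.replicate (max n 0).toNat c1 := by
  rw [PySem.List.pyRange_one, List.map_map]
  simp only [Function.comp_def]
  rw [List.map_const']
  simp only [List.length_range]
  congr 1
  omega

lemma pv_A_eq (n : Int) (c1 c2 : String) (hne : c1 ≠ c2) :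
    ergebnisraum_zmZ n c1 c2
      = (pvSets ((max n 0).toNat)).map (pvMask ((max n 0).toNat) c1 c2) := by
  unfold ergebnisraum_zmZ
  simp only [pv_erstes n c1]
  rw [List.length_replicate]
  have h0 : [List.replicate ((max n 0).toNat) c1]
      = ((pvSets ((max n 0).toNat)).take 1).map (pvMask ((max n 0).toNat) c1 c2) := by
    conv_lhs => rw [← pv_mask_nil (L := (max n 0).toNat) (c1 := c1) (c2 := c2)]
    rw [pvSets_eq]
    rfl
  rw [h0]
  have := pv_run (L := (max n 0).toNat) hne (pvSets ((max n 0).toNat)) [] (2 ^ (max n 0).toNat + 1)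
    (by simp) (by have := pv_card (L := (max n 0).toNat); omega)
  simpa using this

lemma pv_children_mask {L : Nat} {c1 c2 : String} {S : List Nat} (hne : c1 ≠ c2)
    (hpw : S.Pairwise (· < ·)) (hbd : ∀ x ∈ S, x < L) :
    pvB_children c2 (pvMask L c1 c2 S) = (pvBlock L S).map (pvMask L c1 c2) := by
  unfold pvB_children pvBlock
  rw [pvMask_length, List.map_map]
  have hfil : (List.range L).filter (fun i => decide (c2 ∉ (pvMask L c1 c2 S).drop i))
      = (List.range L).filter (fun i => S.all (fun x => decide (x < i))) := by
    apply List.filter_congr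
    intro i hi
    have hdrop := pv_mem_mask_drop (L := L) (S := S) (i := i) hne hbd
    by_cases hc : c2 ∈ (pvMask L c1 c2 S).drop i
    · obtain ⟨j, hjS, hij⟩ := hdrop.mp hc
      simp only [hc, decide_not, decide_true, Bool.not_true]
      symm
      rw [List.all_eq_false]
      exact ⟨j, hjS, by simp; omega⟩
    · simp only [hc, decide_not, decide_false, Bool.not_false]
      symm
      rw [List.all_eq_true]
      intro j hjS
      simp only [decide_eq_true_eq]
      by_contra hcon
      exact hc (hdrop.mpr ⟨j, hjS, by omega⟩)
  rw [hfil]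
  apply List.map_congr_left
  intro i hi
  rcases List.mem_filter.mp hi with ⟨hir, -⟩
  have hiL : i < L := List.mem_range.mp hir
  show (pvMask L c1 c2 S).take i ++ c2 :: (pvMask L c1 c2 S).drop (i + 1)
      = pvMask L c1 c2 (S ++ [i])
  rw [← pvMask_set hiL]
  rw [List.set_eq_take_append_cons_drop, if_pos (by rw [pvMask_length]; exact hiL)]

lemma pv_B_fold {L : Nat} {c1 c2 : String} (hne : c1 ≠ c2) :
    ∀ (l : List Nat) (j : Nat),
      l.foldl (fun (st : List (List String) × List (List String)) _ =>
          (st.1 ++ st.2, st.2.flatMap (pvB_children c2)))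
        ((pvFL L j).map (pvMask L c1 c2), (pvLevel L j).map (pvMask L c1 c2))
      = ((pvFL L (j + l.length)).map (pvMask L c1 c2),
         (pvLevel L (j + l.length)).map (pvMask L c1 c2)) := by
  intro l
  induction l with
  | nil => intro j; simp
  | cons x l ih =>
    intro j
    rw [List.foldl_cons]
    have hstep : ((pvFL L j).map (pvMask L c1 c2) ++ (pvLevel L j).map (pvMask L c1 c2),
        ((pvLevel L j).map (pvMask L c1 c2)).flatMap (pvB_children c2))
        = ((pvFL L (j + 1)).map (pvMask L c1 c2), (pvLevel L (j + 1)).map (pvMask L c1 c2)) := by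
      congr 1
      · rw [← List.map_append]
        congr 1
        unfold pvFL
        rw [List.range_succ, List.flatMap_append]
        simp
      · rw [List.flatMap_map]
        have h1 : (pvLevel L j).flatMap (fun S => pvB_children c2 (pvMask L c1 c2 S))
            = (pvLevel L j).flatMap (fun S => (pvBlock L S).map (pvMask L c1 c2)) := by
          rw [List.flatMap_def, List.flatMap_def]
          congr 1
          apply List.map_congr_left
          intro S hSmem
          obtain ⟨-, pw, bd⟩ := pvLevel_mem hSmem
          exact pv_children_mask hne pw bd
        rw [show (fun S => pvB_children c2 (pvMask L c1 c2 S))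
            = (pvB_children c2 ∘ pvMask L c1 c2) from rfl] at h1 ⊢
        rw [h1, ← List.map_flatMap]
        rfl
    rw [hstep, ih (j + 1)]
    have hlen : j + (x :: l).length = j + 1 + l.length := by
      simp only [List.length_cons]
      omega
    rw [hlen]

lemma pv_B_eq (n : Int) (c1 c2 : String) (hne : c1 ≠ c2) :
    ergebnisraum_zmZ_alt n c1 c2
      = (pvSets ((max n 0).toNat)).map (pvMask ((max n 0).toNat) c1 c2) := by
  unfold ergebnisraum_zmZ_alt
  have hinit : (([] : List (List String)), [List.replicate ((max n 0).toNat) c1])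
      = ((pvFL ((max n 0).toNat) 0).map (pvMask ((max n 0).toNat) c1 c2),
         (pvLevel ((max n 0).toNat) 0).map (pvMask ((max n 0).toNat) c1 c2)) := by
    rw [show pvFL ((max n 0).toNat) 0 = [] from rfl,
      show pvLevel ((max n 0).toNat) 0 = [[]] from rfl]
    rw [List.map_nil, List.map_cons, List.map_nil, pv_mask_nil]
  show ((List.range ((max n 0).toNat + 1)).foldl
      (fun (st : List (List String) × List (List String)) _ =>
        (st.1 ++ st.2, st.2.flatMap (pvB_children c2)))
      ([], [List.replicate ((max n 0).toNat) c1])).1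
    = (pvSets ((max n 0).toNat)).map (pvMask ((max n 0).toNat) c1 c2)
  rw [hinit, pv_B_fold hne (List.range ((max n 0).toNat + 1)) 0]
  simp [pvSets]

lemma pv_set_replicate {L : Nat} {c : String} (i : Nat) :
    (List.replicate L c).set i c = List.replicate L c := by
  apply List.ext_getElem
  · simp
  · intro j h1 h2
    simp [List.getElem_set]

lemma pv_A_const (n : Int) (c1 : String) :
    ergebnisraum_zmZ n c1 c1 = [List.replicate ((max n 0).toNat) c1] := by
  unfold ergebnisraum_zmZ
  simp only [pv_erstes n c1]
  rw [List.length_replicate]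
  have hinner : pvA_inner c1 (List.replicate ((max n 0).toNat) c1)
      [List.replicate ((max n 0).toNat) c1] = [List.replicate ((max n 0).toNat) c1] := by
    unfold pvA_inner
    apply pv_foldl_const
    intro i hi
    simp only [pv_set_replicate i]
    rw [if_neg (by simp)]
  obtain ⟨f, hf⟩ : ∃ f, 2 ^ (max n 0).toNat + 1 = f + 2 := by
    have h : 0 < 2 ^ (max n 0).toNat := Nat.pow_pos (by norm_num)
    generalize hP : 2 ^ (max n 0).toNat = P at h ⊢
    exact ⟨P - 1, by omega⟩
  rw [hf, pvA_loop]
  rw [dif_pos (by simp)]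
  simp only [List.getElem_cons_zero, hinner]
  rw [pvA_loop]
  rw [dif_neg (by simp)]

lemma pv_B_stall {c2 : String} : ∀ (l : List Nat) (om : List (List String)),
    l.foldl (fun (st : List (List String) × List (List String)) _ =>
        (st.1 ++ st.2, st.2.flatMap (pvB_children c2))) (om, []) = (om, []) := by
  intro l
  induction l with
  | nil => intro om; rfl
  | cons x l ih =>
    intro om
    rw [List.foldl_cons]
    show l.foldl _ (om ++ [], []) = _
    rw [List.append_nil]
    exact ih om

lemma pv_children_const {L : Nat} {c1 : String} :
    pvB_children c1 (List.replicate L c1) = [] := by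
  unfold pvB_children
  have : (List.range (List.replicate L c1).length).filter
      (fun i => decide (c1 ∉ (List.replicate L c1).drop i)) = [] := by
    rw [List.filter_eq_nil_iff]
    intro i hi
    simp only [List.length_replicate, List.mem_range] at hi
    simp only [List.drop_replicate, decide_not, Bool.not_eq_true', decide_eq_false_iff_not,
      not_not]
    exact List.mem_replicate.mpr ⟨by omega, rfl⟩
  rw [this]
  rfl

lemma pv_B_const (n : Int) (c1 : String) :
    ergebnisraum_zmZ_alt n c1 c1 = [List.replicate ((max n 0).toNat) c1] := by
  unfold ergebnisraum_zmZ_alt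
  show ((List.range ((max n 0).toNat + 1)).foldl
      (fun (st : List (List String) × List (List String)) _ =>
        (st.1 ++ st.2, st.2.flatMap (pvB_children c1)))
      ([], [List.replicate ((max n 0).toNat) c1])).1
    = [List.replicate ((max n 0).toNat) c1]
  rw [List.range_succ_eq_map, List.foldl_cons]
  show ((List.map Nat.succ (List.range ((max n 0).toNat))).foldl _
      ([] ++ [List.replicate ((max n 0).toNat) c1],
       [List.replicate ((max n 0).toNat) c1].flatMap (pvB_children c1))).1 = _
  rw [List.nil_append]
  have : [List.replicate ((max n 0).toNat) c1].flatMap (pvB_children c1) = [] := by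
    simp [pv_children_const]
  rw [this, pv_B_stall]

-- ===== VERDICT (by name: the statement is the Claim_ definition above) =====
theorem ergebnisraum_zmZ_spec : Claim_equal_ergebnisraum_zmZ := by
  intro n c1 c2 _
  unfold Spec_ergebnisraum_zmZ
  by_cases hne : c1 = c2
  · subst hne
    rw [pv_A_const, pv_B_const]
  · rw [pv_A_eq n c1 c2 hne, pv_B_eq n c1 c2 hne]
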